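-- pv_equiv track=rewrite | github.com/oduodg/Python-Algorithm | Programmers/level-3/최고의 집합.py | solution
-- ===== SOURCE A (Python) =====
-- def solution(n, s):
--     # 최고의 집합이 존재하지 않는 경우
--     if n > s:
--         return [-1]
--
--     result = []
--
--     for i in range(n, 0, -1):
--         if i == 1:
--             result.append(s)
--             break
--
--         num = s // i
--         s -= num
--         result.append(num)
--
--     return sorted(result)
-- ===== SOURCE B (Python) =====
-- def solution(n, s):
--     # best set of n positive ints summing to s: direct closed form
--     if n > s:
--         return [-1]
--     if n <= 0:
--         return []
--     q, r = divmod(s, n)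
--     return [q] * (n - r) + [q + 1] * r
-- ===== Notes on version B (the rewrite author's own statement) =====
-- stated objective: faster
-- what changed: Replaces A's n-step greedy division loop followed by a sort with the closed form q=s//n, r=s%n giving (n-r) copies of q then r copies of q+1, built directly in order (no loop over i, no sort).
import Mathlib
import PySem

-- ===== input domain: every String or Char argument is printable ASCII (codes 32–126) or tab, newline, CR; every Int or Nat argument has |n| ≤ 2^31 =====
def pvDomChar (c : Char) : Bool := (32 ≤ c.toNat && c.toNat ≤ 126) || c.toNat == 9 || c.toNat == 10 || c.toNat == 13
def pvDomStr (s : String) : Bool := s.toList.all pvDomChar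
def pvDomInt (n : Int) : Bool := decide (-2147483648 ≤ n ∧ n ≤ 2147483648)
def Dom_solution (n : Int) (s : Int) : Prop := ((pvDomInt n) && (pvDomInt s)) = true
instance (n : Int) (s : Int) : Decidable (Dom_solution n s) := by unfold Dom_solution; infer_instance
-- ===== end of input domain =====

-- B replaces A's greedy division loop + sort with the closed form (n-r) copies of s//n then r copies of s//n+1 (faster: O(n) vs O(n log n)).

-- ===== PORT A =====
-- the for-loop over range(n, 0, -1) with its break at i == 1, carrying (s, result)
def solLoopA : List Int → Int → List Int → List Int
  | [], _, result => result
  | i :: rest, s, result =>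
    if i == 1 then result ++ [s]
    else solLoopA rest (s - PySem.Int.floordiv s i) (result ++ [PySem.Int.floordiv s i])

def solution (n : Int) (s : Int) : List Int :=
  if n > s then [-1]
  else PySem.List.sorted (solLoopA (PySem.List.pyRange n 0 (-1)) s []) (fun x => x) false

-- ===== PORT B =====
def solution_alt (n : Int) (s : Int) : List Int :=
  if n > s then [-1]
  else if n ≤ 0 then []
  else
    let q := PySem.Int.floordiv s n
    let r := PySem.Int.mod s n
    List.replicate (n - r).toNat q ++ List.replicate r.toNat (q + 1)

-- ===== PRECONDITION & SPEC =====
def Spec_solution (n : Int) (s : Int) (out : List Int) : Prop := out = solution_alt n s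
instance (n : Int) (s : Int) (out : List Int) : Decidable (Spec_solution n s out) := by unfold Spec_solution; infer_instance

-- ===== CLAIM (what is proved, stated in full; the proofs are below) =====
def Claim_equal_solution : Prop := ∀ (n : Int) (s : Int), Dom_solution n s → Spec_solution n s (solution n s)

-- ===== LEMMAS AND PROOFS =====

-- A's loop from i down to 1 produces exactly the closed-form list, already sorted.
theorem solLoopA_closed (k : Nat) :
    ∀ (i s : Int) (acc : List Int), i.toNat = k + 1 → 1 ≤ i →
      solLoopA (PySem.List.pyRange i 0 (-1)) s acc =
        acc ++ List.replicate (i - PySem.Int.mod s i).toNat (PySem.Int.floordiv s i)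
            ++ List.replicate (PySem.Int.mod s i).toNat (PySem.Int.floordiv s i + 1) := by
  induction k with
  | zero =>
    intro i s acc hk hi
    have hi1 : i = 1 := by omega
    subst hi1
    rw [PySem.List.pyRange_neg_one_cons (by omega)]
    rw [PySem.List.pyRange_neg_one_eq_nil (by omega)]
    simp [solLoopA]
  | succ k ih =>
    intro i s acc hk hi
    have hi2 : 2 ≤ i := by omega
    rw [PySem.List.pyRange_neg_one_cons (by omega)]
    have hne : (i == 1) = false := by simp; omega
    simp only [solLoopA, hne]
    set q := PySem.Int.floordiv s i with hq
    set r := PySem.Int.mod s i with hr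
    have hrb : 0 ≤ r ∧ r < i := ⟨PySem.Int.mod_nonneg s (by omega), PySem.Int.mod_lt s (by omega)⟩
    have hsq : q * i + r = s := PySem.Int.floordiv_mul_add_mod s i
    have hs' : s - q = r + q * (i - 1) := by ring_nf; omega
    have hrec := ih (i - 1) (s - q) (acc ++ [q]) (by omega) (by omega)
    rw [hrec]
    have hipos : (0:Int) < i - 1 := by omega
    by_cases hcase : r < i - 1
    · have hd : PySem.Int.floordiv (s - q) (i - 1) = q := by
        rw [PySem.Int.floordiv_eq_ediv_of_pos hipos, hs', Int.add_mul_ediv_right r q (by omega),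
          Int.ediv_eq_zero_of_lt hrb.1 hcase, zero_add]
      have hm : PySem.Int.mod (s - q) (i - 1) = r := by
        rw [PySem.Int.mod_eq_emod_of_pos hipos, hs', Int.add_mul_emod_self_right r q (i-1),
          Int.emod_eq_of_lt hrb.1 hcase]
      rw [hd, hm]
      have hcount : ((i - 1) - r).toNat + 1 = (i - r).toNat := by omega
      rw [← hcount, List.replicate_succ]
      simp
    · have hreq : r = i - 1 := by omega
      have hs'' : s - q = (q + 1) * (i - 1) := by rw [hs', hreq]; ring
      have hd : PySem.Int.floordiv (s - q) (i - 1) = q + 1 := by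
        rw [PySem.Int.floordiv_eq_ediv_of_pos hipos, hs'', Int.mul_ediv_cancel _ (by omega)]
      have hm : PySem.Int.mod (s - q) (i - 1) = 0 := by
        rw [PySem.Int.mod_eq_emod_of_pos hipos, hs'', Int.mul_emod_left]
      rw [hd, hm]
      have h1 : (i - r).toNat = 1 := by omega
      have h2 : ((i - 1) - (0:Int)).toNat = r.toNat := by omega
      simp only [h1, h2, Int.toNat_zero, List.replicate_zero, List.replicate_one,
        List.append_nil, List.append_assoc]
      simp

-- the closed-form list is nondecreasing
theorem closed_pairwise (a b : Nat) (q : Int) :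
    (List.replicate a q ++ List.replicate b (q + 1)).Pairwise (fun x y => x ≤ y) := by
  rw [List.pairwise_append]
  refine ⟨List.pairwise_replicate.2 (by omega), List.pairwise_replicate.2 (by omega), ?_⟩
  intro x hx y hy
  rw [List.eq_of_mem_replicate hx, List.eq_of_mem_replicate hy]
  omega

-- ===== VERDICT (by name: the statement is the Claim_ definition above) =====
theorem solution_spec : Claim_equal_solution := by
  intro n s _
  unfold Spec_solution solution solution_alt
  by_cases hns : n > s
  · simp [hns]
  · simp only [hns, if_false]
    by_cases hn : n ≤ 0
    · rw [PySem.List.pyRange_neg_one_eq_nil (by omega)]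
      simp [solLoopA, hn, PySem.List.sorted]
    · simp only [hn, if_false]
      have h1 : 1 ≤ n := by omega
      rw [solLoopA_closed (n.toNat - 1) n s [] (by omega) h1, List.nil_append]
      exact PySem.List.sorted_eq_self_of_pairwise _ _ (closed_pairwise _ _ _)
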